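-- pv_equiv track=rewrite | github.com/PauloBicalho/UPsCAle | producao/src/Preprocessamento/flexWords.py | flexWords
-- ===== SOURCE A (Python) =====
-- TABLE  = {
--     "oes":"ao",
--     "agens":"agem",
--     "ades":"ade",
--     "entos":"ento",
--     "ismos":"ismo",
--     "ivos":"ivo",
--     "oras":"or",
--     "ora":"or",
--     "ores":"or",
--     "ada":"ado",
--     "adas":"ado",
--     "ados":"ado",
--     "antes":"ante",
--     "entes":"ente",
--     "eis":"el",
--     "ais":"al",
--     "os":"o",
--     "as":"a",
--     "es":"e",
--     "ais":"al",
--     "nhas":"nha",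
--     "nhos":"nho",
--     "uns":"um"
-- }
--
-- MAXLEN = 5
--
-- def flexWords(word):
--     sf = sm = adj = adv = desc = subst = 0
--
--     patterLen = len(word);
--     if(patterLen > MAXLEN):
--         patterLen = MAXLEN
--
--     # verifica casamento com padrao maior
--     while(patterLen > 0):
--         if word[len(word)-patterLen:len(word)] in TABLE:
--             return word[0:len(word)-patterLen] + TABLE[word[len(word)-patterLen:len(word)]]
--         patterLen -= 1
--
--     # nao modificou
--     return word
-- ===== SOURCE B (Python) =====
-- # Suffix-rewrite table encoded as "reversed_suffix:replacement" rules; the word is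
-- # reversed once and each rule tested with startswith, keeping the longest match.
-- _RULES = [p.split(":") for p in (
--     "seo:ao snega:agem seda:ade sotne:ento somsi:ismo sovi:ivo saro:or aro:or "
--     "sero:or ada:ado sada:ado soda:ado setna:ante setne:ente sie:el sia:al "
--     "so:o sa:a se:e sahn:nha sohn:nho snu:um"
-- ).split()]
--
-- def flexWords(word):
--     rv = word[::-1]
--     best_len = 0
--     best_rep = None
--     for rs, rep in _RULES:
--         if len(rs) > best_len and rv.startswith(rs):
--             best_len, best_rep = len(rs), rep
--     if best_rep is None:
--         return word
--     return word[:len(word) - best_len] + best_rep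
-- ===== Notes on version B (the rewrite author's own statement) =====
-- stated objective: alternative
-- what changed: A slices the word at each candidate suffix length (5 down to 1) and tests membership in a suffix->replacement dict; B stores the table as reversed-suffix rules, reverses the word once and does a single unsorted scan keeping the longest startswith match.
import Mathlib
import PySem

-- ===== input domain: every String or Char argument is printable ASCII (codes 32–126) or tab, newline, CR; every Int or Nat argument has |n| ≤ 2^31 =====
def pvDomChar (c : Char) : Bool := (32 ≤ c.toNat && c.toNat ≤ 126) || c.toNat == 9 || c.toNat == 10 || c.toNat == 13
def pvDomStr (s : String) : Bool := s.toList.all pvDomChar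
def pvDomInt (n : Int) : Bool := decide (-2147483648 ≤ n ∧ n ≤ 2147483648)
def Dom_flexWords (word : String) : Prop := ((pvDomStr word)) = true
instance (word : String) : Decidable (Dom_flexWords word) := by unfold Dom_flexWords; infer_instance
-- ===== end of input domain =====

-- B replaces A's slice-each-length-then-dict-lookup countdown by a different algorithm:
-- the rule table is kept as "reversed_suffix:replacement" strings, the word is reversed
-- once, and a single unsorted scan keeps the longest startswith match (objective:
-- alternative; same cost on this fixed 22-entry table).

-- ===== PORT A =====
-- Python dict literal TABLE (the source repeats the key "ais":"al"; the dict literal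
-- collapses the duplicate in place, leaving these 22 entries in insertion order)
def pvTABLE : PySem.Dict (List Char) (List Char) :=
  ⟨[("oes".toList,"ao".toList), ("agens".toList,"agem".toList), ("ades".toList,"ade".toList),
    ("entos".toList,"ento".toList), ("ismos".toList,"ismo".toList), ("ivos".toList,"ivo".toList),
    ("oras".toList,"or".toList), ("ora".toList,"or".toList), ("ores".toList,"or".toList),
    ("ada".toList,"ado".toList), ("adas".toList,"ado".toList), ("ados".toList,"ado".toList),
    ("antes".toList,"ante".toList), ("entes".toList,"ente".toList), ("eis".toList,"el".toList),
    ("ais".toList,"al".toList), ("os".toList,"o".toList), ("as".toList,"a".toList),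
    ("es".toList,"e".toList), ("nhas".toList,"nha".toList), ("nhos".toList,"nho".toList),
    ("uns".toList,"um".toList)]⟩

-- the while-loop: patterLen counts down; 'word[len-p:len] in TABLE' tested, hit returns
def pvLoopA (cs : List Char) : Nat → List Char
  | 0 => cs
  | p+1 =>
    match pvTABLE.get? (PySem.Chars.slice cs (some ((cs.length : Int) - ((p:Int)+1))) (some (cs.length : Int))) with
    | some v => PySem.Chars.slice cs (some 0) (some ((cs.length : Int) - ((p:Int)+1))) ++ v
    | none => pvLoopA cs p

def flexWords (word : String) : String :=
  let n := word.toList.length               -- patterLen = len(word)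
  String.ofList (pvLoopA word.toList (if 5 < n then 5 else n))   -- capped at MAXLEN = 5

-- ===== PORT B =====
-- _RULES = [p.split(":") for p in "seo:ao snega:agem … snu:um".split()]
-- (each rule holds exactly one ':', so the unpacking into (rs, rep) always succeeds;
--  the ([], []) arm is unreachable)
def pvRULES : List (List Char × List Char) :=
  (PySem.Chars.split₀ ("seo:ao snega:agem seda:ade sotne:ento somsi:ismo sovi:ivo saro:or aro:or sero:or ada:ado sada:ado soda:ado setna:ante setne:ente sie:el sia:al so:o sa:a se:e sahn:nha sohn:nho snu:um".toList)).map
    (fun p => match PySem.Chars.split? p [':'] with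
      | some [rs, rep] => (rs, rep)
      | _ => ([], []))

-- loop body: if len(rs) > best_len and rv.startswith(rs): best_len, best_rep = len(rs), rep
def pvStep (rv : List Char) (acc : Nat × Option (List Char)) (e : List Char × List Char) :
    Nat × Option (List Char) :=
  if e.1.length > acc.1 ∧ PySem.Chars.startswith rv e.1 then (e.1.length, some e.2) else acc

def flexWords_alt (word : String) : String :=
  -- rv = word[::-1] is word.toList.reverse (PySem.Str.slice?_none_none_neg_one);
  -- the foldl is the for-loop over _RULES from (best_len, best_rep) = (0, None)
  match pvRULES.foldl (pvStep word.toList.reverse) (0, none) with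
  | (_, none) => word
  | (p, some rep) =>                        -- word[:len(word)-best_len] + best_rep
      String.ofList (PySem.Chars.slice word.toList none (some ((word.toList.length : Int) - (p : Int))) ++ rep)

-- ===== PRECONDITION & SPEC =====
def Spec_flexWords (word : String) (out : String) : Prop := out = flexWords_alt word
instance (word : String) (out : String) : Decidable (Spec_flexWords word out) := by unfold Spec_flexWords; infer_instance

-- ===== CLAIM (what is proved, stated in full; the proofs are below) =====
def Claim_equal_flexWords : Prop := ∀ (word : String), Dom_flexWords word → Spec_flexWords word (flexWords word)

-- ===== LEMMAS AND PROOFS =====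

-- A-side proof helpers: A's descending countdown, phrased as one scan of the table
-- entries sorted by strictly descending key length (stable), then shown equal to B's
-- longest-match fold over the unsorted reversed-key rules.
def pvITEMS : List (List Char × List Char) :=
  PySem.List.sorted pvTABLE.items (fun kv => -(kv.1.length : Int))

def pvScanDesc (cs : List Char) : List (List Char × List Char) → List Char
  | [] => cs
  | (k,v) :: rest =>
    if PySem.Chars.endswith cs k then
      PySem.Chars.slice cs none (some ((cs.length : Int) - (k.length : Int))) ++ v
    else pvScanDesc cs rest

-- B-side proof helpers: the rules in descending key-length order, and the fold
-- re-read as a first-match scan of that ordered list.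
def pvSORT : List (List Char × List Char) :=
  [("snega".toList,"agem".toList), ("sotne".toList,"ento".toList), ("somsi".toList,"ismo".toList),
   ("setna".toList,"ante".toList), ("setne".toList,"ente".toList),
   ("seda".toList,"ade".toList), ("sovi".toList,"ivo".toList), ("saro".toList,"or".toList),
   ("sero".toList,"or".toList), ("sada".toList,"ado".toList), ("soda".toList,"ado".toList),
   ("sahn".toList,"nha".toList), ("sohn".toList,"nho".toList),
   ("seo".toList,"ao".toList), ("aro".toList,"or".toList), ("ada".toList,"ado".toList),
   ("sie".toList,"el".toList), ("sia".toList,"al".toList), ("snu".toList,"um".toList),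
   ("so".toList,"o".toList), ("sa".toList,"a".toList), ("se".toList,"e".toList)]

def pvScanR (rv : List Char) : List (List Char × List Char) → Nat × Option (List Char)
  | [] => (0, none)
  | e :: t => if e.1.length > 0 ∧ PySem.Chars.startswith rv e.1 then (e.1.length, some e.2) else pvScanR rv t

def pvInterp (cs : List Char) : Nat × Option (List Char) → List Char
  | (_, none) => cs
  | (p, some rep) => PySem.Chars.slice cs none (some ((cs.length : Int) - (p : Int))) ++ rep

-- ---------- B side: fold over the unsorted rules = first-match scan of pvSORT ----------

theorem pvStep_comm (rv : List Char) (x y : List Char × List Char)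
    (hxy : PySem.Chars.startswith rv x.1 → PySem.Chars.startswith rv y.1 →
           x.1.length = y.1.length → x = y)
    (z : Nat × Option (List Char)) :
    pvStep rv (pvStep rv z x) y = pvStep rv (pvStep rv z y) x := by
  by_cases hsx : PySem.Chars.startswith rv x.1
  · by_cases hsy : PySem.Chars.startswith rv y.1
    · rcases Nat.lt_trichotomy x.1.length y.1.length with h | h | h
      · simp only [pvStep, hsx, hsy, and_true]
        split_ifs <;> first | rfl | (exfalso; omega)
      · rw [hxy hsx hsy h]
      · simp only [pvStep, hsx, hsy, and_true]
        split_ifs <;> first | rfl | (exfalso; omega)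
    · simp [pvStep, hsy]
  · simp [pvStep, hsx]

theorem fold_stay (rv : List Char) :
    ∀ (l : List (List Char × List Char)) (b : Nat) (r : Option (List Char)),
      (∀ e ∈ l, e.1.length ≤ b) → l.foldl (pvStep rv) (b, r) = (b, r)
  | [], _, _, _ => rfl
  | e :: t, b, r, h => by
    have he : e.1.length ≤ b := h e (by simp)
    have : pvStep rv (b, r) e = (b, r) := by
      simp only [pvStep]
      rw [if_neg]
      rintro ⟨h1, -⟩
      omega
    rw [List.foldl_cons, this]
    exact fold_stay rv t b r (fun e' he' => h e' (by simp [he']))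

theorem fold_desc (rv : List Char) :
    ∀ (l : List (List Char × List Char)),
      l.Pairwise (fun a b => b.1.length ≤ a.1.length) →
      l.foldl (pvStep rv) (0, none) = pvScanR rv l
  | [], _ => rfl
  | e :: t, hp => by
    rcases List.pairwise_cons.mp hp with ⟨hhd, htl⟩
    by_cases hc : e.1.length > 0 ∧ PySem.Chars.startswith rv e.1
    · rw [List.foldl_cons, show pvStep rv (0, none) e = (e.1.length, some e.2) from by
            simp only [pvStep]; rw [if_pos hc],
          fold_stay rv t e.1.length (some e.2) hhd]
      simp only [pvScanR]
      rw [if_pos hc]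
    · rw [List.foldl_cons, show pvStep rv (0, none) e = (0, none) from by
            simp only [pvStep]; rw [if_neg hc],
          fold_desc rv t htl]
      simp only [pvScanR]
      rw [if_neg hc]

set_option maxRecDepth 32768 in
theorem pvRULES_perm : pvRULES.Perm pvSORT := by decide

set_option maxRecDepth 32768 in
theorem pvRULES_uniq : ∀ x ∈ pvRULES, ∀ y ∈ pvRULES, x.1 = y.1 → x = y := by decide

set_option maxRecDepth 32768 in
theorem pvSORT_pairwise : pvSORT.Pairwise (fun a b => b.1.length ≤ a.1.length) := by decide

theorem prefix_eq_of_length (l1 l2 l : List Char) (h1 : l1 <+: l) (h2 : l2 <+: l)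
    (h : l1.length = l2.length) : l1 = l2 := by
  rw [List.prefix_iff_eq_take.mp h1, List.prefix_iff_eq_take.mp h2, h]

theorem fold_eq_scanR (rv : List Char) :
    pvRULES.foldl (pvStep rv) (0, none) = pvScanR rv pvSORT := by
  have hcomm : ∀ x ∈ pvRULES, ∀ y ∈ pvRULES, ∀ z,
      pvStep rv (pvStep rv z x) y = pvStep rv (pvStep rv z y) x := by
    intro x hx y hy z
    refine pvStep_comm rv x y (fun hsx hsy hlen => ?_) z
    have h1 : x.1 <+: rv := (PySem.Chars.startswith_iff rv x.1).mp hsx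
    have h2 : y.1 <+: rv := (PySem.Chars.startswith_iff rv y.1).mp hsy
    exact pvRULES_uniq x hx y hy (prefix_eq_of_length x.1 y.1 rv h1 h2 hlen)
  rw [List.Perm.foldl_eq' pvRULES_perm hcomm]
  exact fold_desc rv pvSORT pvSORT_pairwise

-- ---------- the scan of pvSORT = A's descending endswith scan of pvITEMS ----------

set_option maxRecDepth 32768 in
theorem pvSORT_eq_map : pvSORT = pvITEMS.map (fun e => (e.1.reverse, e.2)) := by decide

set_option maxRecDepth 32768 in
theorem pvITEMS_keys_ne_nil : ∀ e ∈ pvITEMS, e.1 ≠ [] := by decide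

theorem scan_corr (cs : List Char) :
    ∀ l : List (List Char × List Char), (∀ e ∈ l, e.1 ≠ []) →
      pvInterp cs (pvScanR cs.reverse (l.map (fun e => (e.1.reverse, e.2)))) = pvScanDesc cs l
  | [], _ => rfl
  | (k, v) :: t, h => by
    have hk : k ≠ [] := h (k, v) (by simp)
    have hrev : PySem.Chars.startswith cs.reverse k.reverse = PySem.Chars.endswith cs k := rfl
    simp only [List.map_cons, pvScanR, pvScanDesc, List.length_reverse, hrev]
    by_cases hc : PySem.Chars.endswith cs k
    · rw [if_pos ⟨List.length_pos_iff.mpr hk, hc⟩, if_pos hc]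
      rfl
    · rw [if_neg (by rintro ⟨-, h2⟩; exact hc h2), if_neg hc]
      exact scan_corr cs t (fun e he => h e (by simp [he]))

set_option maxRecDepth 32768 in
theorem altEq (word : String) :
    flexWords_alt word = String.ofList (pvScanDesc word.toList pvITEMS) := by
  unfold flexWords_alt
  rw [fold_eq_scanR, pvSORT_eq_map,
      ← scan_corr word.toList pvITEMS pvITEMS_keys_ne_nil]
  generalize pvScanR word.toList.reverse (List.map (fun e => (e.1.reverse, e.2)) pvITEMS) = pr
  obtain ⟨p, r⟩ := pr
  cases r with
  | none => exact (String.ofList_toList).symm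
  | some rep => rfl

-- ---------- A side: the countdown loop = the descending endswith scan ----------

set_option maxRecDepth 32768 in
theorem pvITEMS_eq : pvITEMS =
  [("agens".toList,"agem".toList), ("entos".toList,"ento".toList), ("ismos".toList,"ismo".toList),
   ("antes".toList,"ante".toList), ("entes".toList,"ente".toList),
   ("ades".toList,"ade".toList), ("ivos".toList,"ivo".toList), ("oras".toList,"or".toList),
   ("ores".toList,"or".toList), ("adas".toList,"ado".toList), ("ados".toList,"ado".toList),
   ("nhas".toList,"nha".toList), ("nhos".toList,"nho".toList),
   ("oes".toList,"ao".toList), ("ora".toList,"or".toList), ("ada".toList,"ado".toList),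
   ("eis".toList,"el".toList), ("ais".toList,"al".toList), ("uns".toList,"um".toList),
   ("os".toList,"o".toList), ("as".toList,"a".toList), ("es".toList,"e".toList)] := by
  decide

theorem endswith_eq (cs k : List Char) :
    PySem.Chars.endswith cs k = (k == cs.drop (cs.length - k.length)) := by
  have h1 : PySem.Chars.endswith cs k = true ↔ (k == cs.drop (cs.length - k.length)) = true := by
    rw [PySem.Chars.endswith_iff, List.suffix_iff_eq_drop, beq_iff_eq]
  exact Bool.eq_iff_iff.mpr h1

theorem beq_false_of_len_ne {k s : List Char} (h : k.length ≠ s.length) : (k == s) = false := by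
  rw [beq_eq_false_iff_ne]
  rintro rfl; exact h rfl

theorem sliceA_eq (cs : List Char) (p : Nat) (h : p ≤ cs.length) :
    PySem.Chars.slice cs (some ((cs.length : Int) - (p : Int))) (some (cs.length : Int)) =
      cs.drop (cs.length - p) := by
  rw [show ((cs.length : Int) - (p : Int)) = ((cs.length - p : Nat) : Int) from by
        rw [Nat.cast_sub h]]
  simp only [PySem.Chars.slice_eq_listSlice, PySem.List.slice_natCast]
  rw [List.take_of_length_le (by simp)]

theorem sliceA0_eq (cs : List Char) (p : Nat) (h : p ≤ cs.length) :
    PySem.Chars.slice cs (some 0) (some ((cs.length : Int) - (p : Int))) =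
      cs.take (cs.length - p) := by
  rw [show ((cs.length : Int) - (p : Int)) = ((cs.length - p : Nat) : Int) from by
        rw [Nat.cast_sub h],
      show (0 : Int) = ((0 : Nat) : Int) from rfl]
  simp only [PySem.Chars.slice_eq_listSlice, PySem.List.slice_natCast, Nat.sub_zero, List.drop_zero]

theorem sliceB_eq (cs : List Char) (p : Nat) (h : p ≤ cs.length) :
    PySem.Chars.slice cs none (some ((cs.length : Int) - (p : Int))) =
      cs.take (cs.length - p) := by
  rw [show ((cs.length : Int) - (p : Int)) = ((cs.length - p : Nat) : Int) from by
        rw [Nat.cast_sub h]]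
  simp [PySem.List.slice_to]

-- keys of the wrong length never match: lookup over the whole table = lookup over the length-p slice
theorem find_eq_find_filter (s : List Char) (p : Nat) (hs : s.length = p) :
    ∀ items : List (List Char × List Char),
      List.find? (fun q => q.1 == s) items
        = List.find? (fun q => q.1 == s) (items.filter (fun q => q.1.length == p))
  | [] => rfl
  | (k,v) :: rest => by
    by_cases hk : k.length = p
    · simp only [List.filter_cons, hk, beq_self_eq_true, if_true, List.find?_cons]
      cases h : ((k, v).1 == s) <;> simp [find_eq_find_filter s p hs rest]
    · have hne : (k == s) = false := beq_false_of_len_ne (by omega)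
      simp only [List.filter_cons, List.find?_cons, hne]
      simp only [show (k.length == p) = false from by simp [hk], if_false, Bool.false_eq_true]
      exact find_eq_find_filter s p hs rest

theorem find_group_none (s : List Char) (p : Nat) (hs : s.length ≠ p) :
    ∀ G : List (List Char × List Char), (∀ x ∈ G, x.1.length = p) →
      List.find? (fun q => q.1 == s) G = none
  | [], _ => rfl
  | (k,v) :: rest, hG => by
    have hk : k.length = p := hG (k, v) (by simp)
    have hne : (k == s) = false := beq_false_of_len_ne (by omega)
    simp only [List.find?_cons, hne]
    exact find_group_none s p hs rest (fun x hx => hG x (by simp [hx]))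

-- one length-homogeneous group of the descending scan behaves like one level of A's loop
theorem scan_group (cs : List Char) (p : Nat) :
    ∀ (G rest : List (List Char × List Char)), (∀ x ∈ G, x.1.length = p) →
      pvScanDesc cs (G ++ rest) =
        (match (List.find? (fun q => q.1 == cs.drop (cs.length - p)) G).map (·.2) with
         | some v => cs.take (cs.length - p) ++ v
         | none => pvScanDesc cs rest)
  | [], rest, _ => rfl
  | (k,v) :: G, rest, hG => by
    have hk : k.length = p := hG (k, v) (by simp)
    simp only [List.cons_append, pvScanDesc, endswith_eq, hk, List.find?_cons]
    cases h : (k == cs.drop (cs.length - p))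
    · simp only [Bool.false_eq_true, if_false]
      exact scan_group cs p G rest (fun x hx => hG x (by simp [hx]))
    · have hp : p ≤ cs.length := by
        have hkd : k = cs.drop (cs.length - p) := by simpa using h
        have := congrArg List.length hkd
        simp [hk] at this
        omega
      simp only [if_true, sliceB_eq cs p hp, Option.map_some]

-- the per-length groups, read off the dict
theorem filter5_eq : pvTABLE.items.filter (fun q => q.1.length == 5) =
  [("agens".toList,"agem".toList), ("entos".toList,"ento".toList), ("ismos".toList,"ismo".toList),
   ("antes".toList,"ante".toList), ("entes".toList,"ente".toList)] := by decide
theorem filter4_eq : pvTABLE.items.filter (fun q => q.1.length == 4) =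
  [("ades".toList,"ade".toList), ("ivos".toList,"ivo".toList), ("oras".toList,"or".toList),
   ("ores".toList,"or".toList), ("adas".toList,"ado".toList), ("ados".toList,"ado".toList),
   ("nhas".toList,"nha".toList), ("nhos".toList,"nho".toList)] := by decide
theorem filter3_eq : pvTABLE.items.filter (fun q => q.1.length == 3) =
  [("oes".toList,"ao".toList), ("ora".toList,"or".toList), ("ada".toList,"ado".toList),
   ("eis".toList,"el".toList), ("ais".toList,"al".toList), ("uns".toList,"um".toList)] := by decide
theorem filter2_eq : pvTABLE.items.filter (fun q => q.1.length == 2) =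
  [("os".toList,"o".toList), ("as".toList,"a".toList), ("es".toList,"e".toList)] := by decide
theorem filter1_eq : pvTABLE.items.filter (fun q => q.1.length == 1) = [] := by decide

-- one level of A's loop = lookup of the length-p suffix in the length-p group
theorem loopA_level (cs : List Char) (p q : Nat) (hq : p = q + 1) (h : p ≤ cs.length) :
    pvLoopA cs p =
      (match (List.find? (fun r => r.1 == cs.drop (cs.length - p))
               (pvTABLE.items.filter (fun r => r.1.length == p))).map (·.2) with
       | some v => cs.take (cs.length - p) ++ v
       | none => pvLoopA cs q) := by
  subst hq
  have hcast : ((q : Int) + 1) = ((q + 1 : Nat) : Int) := by push_cast; ring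
  show (match pvTABLE.get? (PySem.Chars.slice cs (some ((cs.length : Int) - ((q:Int)+1))) (some (cs.length : Int))) with
    | some v => PySem.Chars.slice cs (some 0) (some ((cs.length : Int) - ((q:Int)+1))) ++ v
    | none => pvLoopA cs q) = _
  rw [hcast, sliceA_eq cs (q+1) h, sliceA0_eq cs (q+1) h]
  rw [PySem.Dict.get?,
      find_eq_find_filter (cs.drop (cs.length - (q+1))) (q+1) (by simp; omega) pvTABLE.items]

theorem main_eq (cs : List Char) :
    pvLoopA cs (if 5 < cs.length then 5 else cs.length) = pvScanDesc cs pvITEMS := by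
  have hsplit : pvITEMS =
      (pvTABLE.items.filter (fun r => r.1.length == 5)) ++
      ((pvTABLE.items.filter (fun r => r.1.length == 4)) ++
      ((pvTABLE.items.filter (fun r => r.1.length == 3)) ++
      ((pvTABLE.items.filter (fun r => r.1.length == 2)) ++ ([] : List (List Char × List Char))))) := by
    rw [pvITEMS_eq, filter5_eq, filter4_eq, filter3_eq, filter2_eq]; rfl
  have hg : ∀ p, ∀ x ∈ pvTABLE.items.filter (fun r => r.1.length == p), x.1.length = p := by
    intro p x hx
    simpa using List.of_mem_filter hx
  rw [hsplit, scan_group cs 5 _ _ (hg 5), scan_group cs 4 _ _ (hg 4),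
      scan_group cs 3 _ _ (hg 3), scan_group cs 2 _ _ (hg 2)]
  have hskip : ∀ p, cs.length < p →
      (List.find? (fun r => r.1 == cs.drop (cs.length - p))
        (pvTABLE.items.filter (fun r => r.1.length == p))).map (·.2) = (none : Option (List Char)) := by
    intro p hp
    rw [find_group_none (cs.drop (cs.length - p)) p (by simp; omega) _ (hg p)]
    rfl
  rcases Nat.lt_or_ge cs.length 5 with hn | hn
  · -- short word: patterLen starts at len(word); the scan's longer groups never hit
    have h0 : cs.length = 0 ∨ cs.length = 1 ∨ cs.length = 2 ∨ cs.length = 3 ∨ cs.length = 4 := by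
      omega
    rcases h0 with h | h | h | h | h
    · rw [show (if 5 < cs.length then 5 else cs.length) = 0 from by simp [h],
          hskip 5 (by omega), hskip 4 (by omega), hskip 3 (by omega), hskip 2 (by omega)]
      rfl
    · rw [show (if 5 < cs.length then 5 else cs.length) = 1 from by simp [h],
          loopA_level cs 1 0 rfl (by omega), filter1_eq,
          hskip 5 (by omega), hskip 4 (by omega), hskip 3 (by omega), hskip 2 (by omega)]
      rfl
    · rw [show (if 5 < cs.length then 5 else cs.length) = 2 from by simp [h],
          loopA_level cs 2 1 rfl (by omega), loopA_level cs 1 0 rfl (by omega), filter1_eq,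
          hskip 5 (by omega), hskip 4 (by omega), hskip 3 (by omega)]
      rfl
    · rw [show (if 5 < cs.length then 5 else cs.length) = 3 from by simp [h],
          loopA_level cs 3 2 rfl (by omega), loopA_level cs 2 1 rfl (by omega),
          loopA_level cs 1 0 rfl (by omega), filter1_eq,
          hskip 5 (by omega), hskip 4 (by omega)]
      rfl
    · rw [show (if 5 < cs.length then 5 else cs.length) = 4 from by simp [h],
          loopA_level cs 4 3 rfl (by omega), loopA_level cs 3 2 rfl (by omega),
          loopA_level cs 2 1 rfl (by omega), loopA_level cs 1 0 rfl (by omega), filter1_eq,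
          hskip 5 (by omega)]
      rfl
  · -- len(word) ≥ 5: patterLen starts at MAXLEN = 5, both run levels 5,4,3,2 (level 1 is empty)
    have hp0 : (if 5 < cs.length then 5 else cs.length) = 5 := by
      split_ifs with h <;> omega
    rw [hp0, loopA_level cs 5 4 rfl (by omega), loopA_level cs 4 3 rfl (by omega),
        loopA_level cs 3 2 rfl (by omega), loopA_level cs 2 1 rfl (by omega),
        loopA_level cs 1 0 rfl (by omega), filter1_eq]
    rfl

-- ===== VERDICT (by name: the statement is the Claim_ definition above) =====
theorem flexWords_spec : Claim_equal_flexWords := by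
  intro word _
  unfold Spec_flexWords flexWords
  rw [altEq word]
  exact congrArg String.ofList (main_eq word.toList)
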